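-- pv_equiv track=rewrite | github.com/cemiller220/dw_casting_backend | data_prep_functions.py | calculate_show_order_stats
-- ===== SOURCE A (Python) =====
-- def calculate_show_order_stats(show_order, dancer_overlap):
--     num_back_to_back = 0
--     num_one_between = 0
--     num_two_between = 0
--     for ind, piece in enumerate(show_order[:-1]):
--         if piece != 'INTERMISSION' and piece != '':
--             if show_order[ind+1] == 'INTERMISSION':
--                 continue
--             num_back_to_back += len(dancer_overlap[piece][show_order[ind+1]])
--             if ind == len(show_order) - 2:
--                 continue
--
--             if show_order[ind+2] == 'INTERMISSION':
--                 continue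
--             num_one_between += len(dancer_overlap[piece][show_order[ind+2]])
--             if ind == len(show_order) - 3:
--                 continue
--
--             if show_order[ind+3] == 'INTERMISSION':
--                 continue
--             num_two_between += len(dancer_overlap[piece][show_order[ind+3]])
--     return {'num_back_to_back': num_back_to_back, 'num_one_between': num_one_between, 'num_two_between': num_two_between}
-- ===== SOURCE B (Python) =====
-- def calculate_show_order_stats(show_order, dancer_overlap):
--     totals = [0, 0, 0]
--     segment = []
--     for piece in show_order + ['INTERMISSION']:
--         if piece == 'INTERMISSION':
--             for i in range(len(segment)):
--                 src = segment[i]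
--                 if src != '':
--                     for k in (1, 2, 3):
--                         if i + k < len(segment):
--                             totals[k - 1] += len(dancer_overlap[src][segment[i + k]])
--             segment = []
--         else:
--             segment.append(piece)
--     return {'num_back_to_back': totals[0],
--             'num_one_between': totals[1],
--             'num_two_between': totals[2]}
-- ===== Notes on version B (the rewrite author's own statement) =====
-- stated objective: alternative
-- what changed: Instead of scanning forward from each piece with cascading continues and INTERMISSION tests on each target, B splits the show order into INTERMISSION-free segments and, per segment, sums overlaps of every in-segment pair at distance 1, 2 and 3, so no target is ever tested against INTERMISSION.
import Mathlib
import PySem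

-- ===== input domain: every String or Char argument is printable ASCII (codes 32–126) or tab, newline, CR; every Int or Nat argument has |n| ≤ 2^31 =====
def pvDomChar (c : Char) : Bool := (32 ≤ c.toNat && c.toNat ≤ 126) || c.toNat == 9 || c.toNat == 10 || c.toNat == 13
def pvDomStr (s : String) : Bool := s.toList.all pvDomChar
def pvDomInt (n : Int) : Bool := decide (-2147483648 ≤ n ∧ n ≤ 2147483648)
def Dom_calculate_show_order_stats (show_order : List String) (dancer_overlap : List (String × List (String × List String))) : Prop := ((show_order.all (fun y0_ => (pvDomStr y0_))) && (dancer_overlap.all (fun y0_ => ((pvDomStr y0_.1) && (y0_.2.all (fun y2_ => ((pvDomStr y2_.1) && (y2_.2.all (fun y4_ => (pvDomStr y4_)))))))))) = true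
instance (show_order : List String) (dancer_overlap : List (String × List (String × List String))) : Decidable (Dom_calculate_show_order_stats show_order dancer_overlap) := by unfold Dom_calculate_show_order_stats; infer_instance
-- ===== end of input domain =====

-- B replaces A's forward scan with cascading continues by a segment decomposition: split the
-- show order at INTERMISSION and count in-segment pairs at distance 1..3; objective: alternative.

-- shared dict-lookup helper: len(dancer_overlap[piece][tgt]); total via getD, the raising
-- cases (missing key) are excluded by Pre_ below
def pvOvLen (dancer_overlap : List (String × List (String × List String))) (piece tgt : String) : Int :=
  ((((dancer_overlap.lookup piece).getD []).lookup tgt).getD []).length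

-- ===== PORT A =====
def calculate_show_order_stats (show_order : List String) (dancer_overlap : List (String × List (String × List String))) : List (String × Int) :=
  let n : Int := show_order.length
  let res :=
    (PySem.List.enumerate (PySem.List.slice show_order none (some (-1))) 0).foldl
      (fun (st : Int × Int × Int) (p : Int × String) =>
        let ind := p.1
        let piece := p.2
        if piece ≠ "INTERMISSION" ∧ piece ≠ "" then
          if PySem.List.pyGetD show_order (ind + 1) "" = "INTERMISSION" then st
          else
            let st1 : Int × Int × Int := (st.1 + pvOvLen dancer_overlap piece (PySem.List.pyGetD show_order (ind + 1) ""), st.2.1, st.2.2)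
            if ind = n - 2 then st1
            else if PySem.List.pyGetD show_order (ind + 2) "" = "INTERMISSION" then st1
            else
              let st2 : Int × Int × Int := (st1.1, st1.2.1 + pvOvLen dancer_overlap piece (PySem.List.pyGetD show_order (ind + 2) ""), st1.2.2)
              if ind = n - 3 then st2
              else if PySem.List.pyGetD show_order (ind + 3) "" = "INTERMISSION" then st2
              else (st2.1, st2.2.1, st2.2.2 + pvOvLen dancer_overlap piece (PySem.List.pyGetD show_order (ind + 3) ""))
        else st)
      (0, 0, 0)
  [("num_back_to_back", res.1), ("num_one_between", res.2.1), ("num_two_between", res.2.2)]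

-- ===== PORT B =====
-- totals[k-1] += v, for k in (1,2,3)
def pvAddK (st : Int × Int × Int) (k : Nat) (v : Int) : Int × Int × Int :=
  if k = 1 then (st.1 + v, st.2.1, st.2.2)
  else if k = 2 then (st.1, st.2.1 + v, st.2.2)
  else (st.1, st.2.1, st.2.2 + v)

-- the flush of one finished segment: for i in range(len(segment)): …
def pvFlush (ov : List (String × List (String × List String))) (seg : List String) (st : Int × Int × Int) : Int × Int × Int :=
  (List.range seg.length).foldl
    (fun st i =>
      let src := seg.getD i ""
      if src ≠ "" then
        ([1, 2, 3] : List Nat).foldl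
          (fun st k => if i + k < seg.length then pvAddK st k (pvOvLen ov src (seg.getD (i + k) "")) else st) st
      else st) st

def calculate_show_order_stats_alt (show_order : List String) (dancer_overlap : List (String × List (String × List String))) : List (String × Int) :=
  let res :=
    (show_order ++ ["INTERMISSION"]).foldl
      (fun (p : (Int × Int × Int) × List String) piece =>
        if piece = "INTERMISSION" then (pvFlush dancer_overlap p.2 p.1, [])
        else (p.1, p.2 ++ [piece]))
      ((0, 0, 0), [])
  [("num_back_to_back", res.1.1), ("num_one_between", res.1.2.1), ("num_two_between", res.1.2.2)]

-- ===== PRECONDITION & SPEC =====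
-- Pre_ is exactly the set of inputs on which Python A returns: it excludes only the inputs
-- where a dict lookup dancer_overlap[piece][target] that A actually executes raises KeyError.
def Pre_calculate_show_order_stats (show_order : List String) (dancer_overlap : List (String × List (String × List String))) : Prop :=
  ((List.range show_order.length).all (fun i =>
    (show_order.getD i "" == "INTERMISSION") || (show_order.getD i "" == "") ||
    ((List.range 3).all (fun k' =>
      let k := k' + 1
      decide (show_order.length ≤ i + k) ||
      ((List.range k).any (fun m => show_order.getD (i + m + 1) "" == "INTERMISSION")) ||
      (((dancer_overlap.lookup (show_order.getD i "")).getD []).lookup (show_order.getD (i + k) "")).isSome)))) = true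

instance (show_order : List String) (dancer_overlap : List (String × List (String × List String))) : Decidable (Pre_calculate_show_order_stats show_order dancer_overlap) := by unfold Pre_calculate_show_order_stats; infer_instance

def pvWitness_calculate_show_order_stats : List String × (List (String × List (String × List String))) :=
  (["a", "b"], [("a", [("b", ["x", "y"])])])

def Spec_calculate_show_order_stats (show_order : List String) (dancer_overlap : List (String × List (String × List String))) (out : List (String × Int)) : Prop := out = calculate_show_order_stats_alt show_order dancer_overlap
instance (show_order : List String) (dancer_overlap : List (String × List (String × List String))) (out : List (String × Int)) : Decidable (Spec_calculate_show_order_stats show_order dancer_overlap out) := by unfold Spec_calculate_show_order_stats; infer_instance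

-- ===== CLAIM (what is proved, stated in full; the proofs are below) =====
def Claim_equal_calculate_show_order_stats : Prop := ∀ (show_order : List String) (dancer_overlap : List (String × List (String × List String))), Dom_calculate_show_order_stats show_order dancer_overlap → Pre_calculate_show_order_stats show_order dancer_overlap → Spec_calculate_show_order_stats show_order dancer_overlap (calculate_show_order_stats show_order dancer_overlap)

-- ===== LEMMAS AND PROOFS =====

-- componentwise sum on the triple of counters, and its algebra
def pvAdd (a b : Int × Int × Int) : Int × Int × Int := (a.1 + b.1, a.2.1 + b.2.1, a.2.2 + b.2.2)

theorem pvAdd_zero_left (a : Int × Int × Int) : pvAdd (0, 0, 0) a = a := by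
  simp [pvAdd]

theorem pvAdd_zero_right (a : Int × Int × Int) : pvAdd a (0, 0, 0) = a := by
  simp [pvAdd]

theorem pvAdd_assoc (a b c : Int × Int × Int) : pvAdd (pvAdd a b) c = pvAdd a (pvAdd b c) := by
  simp [pvAdd, add_assoc]

def pvSum3 (l : List (Int × Int × Int)) : Int × Int × Int := l.foldl pvAdd (0, 0, 0)

theorem foldl_pvAdd (l : List (Int × Int × Int)) : ∀ st, l.foldl pvAdd st = pvAdd st (pvSum3 l) := by
  induction l with
  | nil => intro st; simp [pvSum3, pvAdd_zero_right]
  | cons x t ih =>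
      intro st
      simp only [pvSum3, List.foldl_cons, pvAdd_zero_left] at *
      rw [ih (pvAdd st x), ih x, pvAdd_assoc]

theorem pvSum3_append (l₁ l₂ : List (Int × Int × Int)) : pvSum3 (l₁ ++ l₂) = pvAdd (pvSum3 l₁) (pvSum3 l₂) := by
  simp only [pvSum3, List.foldl_append]
  rw [foldl_pvAdd l₂]
  rfl

-- a fold whose every step adds a per-element triple is the sum of those triples
theorem foldl_eq_pvAdd_pvSum3 {α : Type} (l : List α) (f : (Int × Int × Int) → α → (Int × Int × Int))
    (g : α → Int × Int × Int) (h : ∀ x ∈ l, ∀ st, f st x = pvAdd st (g x)) :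
    ∀ st, l.foldl f st = pvAdd st (pvSum3 (l.map g)) := by
  induction l with
  | nil => intro st; simp [pvSum3, pvAdd_zero_right]
  | cons x t ih =>
      intro st
      simp only [List.foldl_cons, List.map_cons]
      rw [h x (List.mem_cons_self) st, ih (fun x hx => h x (List.mem_cons_of_mem _ hx))]
      rw [show pvSum3 (g x :: t.map g) = pvAdd (g x) (pvSum3 (t.map g)) from by
        simp only [pvSum3, List.foldl_cons, pvAdd_zero_left]; rw [foldl_pvAdd]; rfl]
      rw [pvAdd_assoc]

-- the contribution of source index i: the three overlap counts A adds for it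
def pvContrib (ov : List (String × List (String × List String))) (so : List String) (i : Nat) : Int × Int × Int :=
  if so.getD i "" ≠ "INTERMISSION" ∧ so.getD i "" ≠ "" then
    ((if i + 1 < so.length ∧ so.getD (i + 1) "" ≠ "INTERMISSION" then pvOvLen ov (so.getD i "") (so.getD (i + 1) "") else 0),
     (if i + 2 < so.length ∧ so.getD (i + 1) "" ≠ "INTERMISSION" ∧ so.getD (i + 2) "" ≠ "INTERMISSION" then pvOvLen ov (so.getD i "") (so.getD (i + 2) "") else 0),
     (if i + 3 < so.length ∧ so.getD (i + 1) "" ≠ "INTERMISSION" ∧ so.getD (i + 2) "" ≠ "INTERMISSION" ∧ so.getD (i + 3) "" ≠ "INTERMISSION" then pvOvLen ov (so.getD i "") (so.getD (i + 3) "") else 0))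
  else (0, 0, 0)

def pvStotal (ov : List (String × List (String × List String))) (so : List String) : Int × Int × Int :=
  pvSum3 ((List.range so.length).map (pvContrib ov so))

-- ===== A-side =====

theorem A_step (ov : List (String × List (String × List String))) (so : List String) (j : Nat)
    (hj : j + 1 < so.length) (hv : so.getD j "" ≠ "INTERMISSION" ∧ so.getD j "" ≠ "") (st : Int × Int × Int) :
    (if PySem.List.pyGetD so ((j : Int) + 1) "" = "INTERMISSION" then st
     else
       let st1 : Int × Int × Int := (st.1 + pvOvLen ov (so.getD j "") (PySem.List.pyGetD so ((j : Int) + 1) ""), st.2.1, st.2.2)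
       if (j : Int) = (so.length : Int) - 2 then st1
       else if PySem.List.pyGetD so ((j : Int) + 2) "" = "INTERMISSION" then st1
       else
         let st2 : Int × Int × Int := (st1.1, st1.2.1 + pvOvLen ov (so.getD j "") (PySem.List.pyGetD so ((j : Int) + 2) ""), st1.2.2)
         if (j : Int) = (so.length : Int) - 3 then st2
         else if PySem.List.pyGetD so ((j : Int) + 3) "" = "INTERMISSION" then st2
         else (st2.1, st2.2.1, st2.2.2 + pvOvLen ov (so.getD j "") (PySem.List.pyGetD so ((j : Int) + 3) "")))
    = pvAdd st (pvContrib ov so j) := by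
  have e1 : PySem.List.pyGetD so ((j : Int) + 1) "" = so.getD (j + 1) "" := by
    rw [show ((j : Int) + 1) = (((j + 1 : Nat)) : Int) from by push_cast; ring, PySem.List.pyGetD_natCast]
  have e2 : PySem.List.pyGetD so ((j : Int) + 2) "" = so.getD (j + 2) "" := by
    rw [show ((j : Int) + 2) = (((j + 2 : Nat)) : Int) from by push_cast; ring, PySem.List.pyGetD_natCast]
  have e3 : PySem.List.pyGetD so ((j : Int) + 3) "" = so.getD (j + 3) "" := by
    rw [show ((j : Int) + 3) = (((j + 3 : Nat)) : Int) from by push_cast; ring, PySem.List.pyGetD_natCast]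
  have c2 : ((j : Int) = (so.length : Int) - 2) ↔ ¬ (j + 2 < so.length) := by omega
  rw [e1, e2, e3]
  simp only [List.getD_eq_getElem?_getD] at hv ⊢
  simp only [pvContrib, List.getD_eq_getElem?_getD, if_pos hv]
  have b1 : so[j + 1]?.getD "" = so[j + 1] := by rw [List.getElem?_eq_getElem hj]; rfl
  by_cases h1 : so[j + 1] = "INTERMISSION"
  · simp [b1, h1, pvAdd]
  · by_cases hl2 : j + 2 < so.length
    · have c3 : ((j : Int) = (so.length : Int) - 3) ↔ ¬ (j + 3 < so.length) := by omega
      have b2 : so[j + 2]?.getD "" = so[j + 2] := by rw [List.getElem?_eq_getElem hl2]; rfl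
      by_cases h2 : so[j + 2] = "INTERMISSION"
      · simp [h1, h2, hj, hl2, c2, pvAdd]
      · by_cases hl3 : j + 3 < so.length
        · have b3 : so[j + 3]?.getD "" = so[j + 3] := by rw [List.getElem?_eq_getElem hl3]; rfl
          by_cases h3 : so[j + 3] = "INTERMISSION"
          · simp [h1, h2, h3, hj, hl2, hl3, c2, c3, pvAdd]
          · simp [h1, h2, h3, hj, hl2, hl3, c2, c3, pvAdd]
        · simp [h1, h2, hj, hl2, hl3, c2, c3, pvAdd]
    · simp [h1, hj, hl2, c2, pvAdd, show ¬ (j + 3 < so.length) from by omega]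

-- enumerate-with-Int-index folds to a range-indexed map
theorem map_enum {α γ : Type} (F : Nat → γ) (G : Int × α → γ) (hG : ∀ p, G p = F p.1.toNat) :
    ∀ (l : List α) (s : Nat), (PySem.List.enumerate l (s : Int)).map G = (List.range l.length).map (fun j => F (s + j)) := by
  intro l
  induction l with
  | nil => intro s; simp [PySem.List.enumerate_nil]
  | cons x t ih =>
      intro s
      rw [PySem.List.enumerate_cons, List.map_cons, hG,
        show ((s : Int) + 1) = (((s + 1 : Nat)) : Int) from by push_cast; ring, ih (s + 1),
        List.length_cons, List.range_succ_eq_map, List.map_cons, List.map_map]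
      refine congrArg₂ _ (by simp) ?_
      refine List.map_congr_left (fun j _ => ?_)
      simp only [Function.comp]
      congr 1
      omega

theorem map_enum_zero {α γ : Type} (F : Nat → γ) (G : Int × α → γ) (hG : ∀ p, G p = F p.1.toNat)
    (l : List α) : (PySem.List.enumerate l (0 : Int)).map G = (List.range l.length).map F := by
  have h := map_enum F G hG l 0
  simpa using h

theorem Stotal_dropLast (ov : List (String × List (String × List String))) (so : List String) :
    pvSum3 ((List.range so.dropLast.length).map (pvContrib ov so)) = pvStotal ov so := by
  cases so with
  | nil => rfl
  | cons a t =>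
      simp only [pvStotal, List.length_dropLast, List.length_cons, Nat.add_sub_cancel]
      rw [List.range_succ, List.map_append, pvSum3_append]
      have hz : pvContrib ov (a :: t) t.length = (0, 0, 0) := by
        simp [pvContrib,
          show ¬ (t.length + 2 < t.length + 1) from by omega,
          show ¬ (t.length + 3 < t.length + 1) from by omega]
      simp [hz, pvSum3, pvAdd_zero_right]

theorem A_eq (so : List String) (ov : List (String × List (String × List String))) :
    calculate_show_order_stats so ov =
      [("num_back_to_back", (pvStotal ov so).1), ("num_one_between", (pvStotal ov so).2.1), ("num_two_between", (pvStotal ov so).2.2)] := by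
  simp only [calculate_show_order_stats]
  rw [PySem.List.slice_to_neg_one]
  refine congrArg (fun r : Int × Int × Int => [("num_back_to_back", r.1), ("num_one_between", r.2.1), ("num_two_between", r.2.2)]) ?_
  refine (foldl_eq_pvAdd_pvSum3 _ _ (fun p => pvContrib ov so p.1.toNat) ?_ _).trans ?_
  · intro p hp st
    obtain ⟨j, hjlt, rfl⟩ := (PySem.List.mem_enumerate_iff _ _ _).mp hp
    have hjn : j + 1 < so.length := by
      have := @List.length_dropLast String so
      omega
    have hdj : so.dropLast[j] = so.getD j "" := by
      rw [List.getElem_dropLast, List.getD_eq_getElem?_getD, List.getElem?_eq_getElem (by omega : j < so.length)]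
      rfl
    dsimp only
    simp only [zero_add, Int.toNat_natCast, hdj]
    by_cases hg : so.getD j "" ≠ "INTERMISSION" ∧ so.getD j "" ≠ ""
    · rw [if_pos hg]
      exact A_step ov so j hjn hg st
    · rw [if_neg hg, pvContrib, if_neg (by
        intro hc
        exact hg ⟨by simpa using hc.1, by simpa using hc.2⟩), pvAdd_zero_right]
  · rw [pvAdd_zero_left, map_enum_zero (pvContrib ov so) _ (fun p => rfl), Stotal_dropLast]

-- ===== B-side =====

theorem flush_eq (ov : List (String × List (String × List String))) (seg : List String)
    (h : "INTERMISSION" ∉ seg) (st : Int × Int × Int) :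
    pvFlush ov seg st = pvAdd st (pvStotal ov seg) := by
  have w : ∀ m, m < seg.length → seg.getD m "" ≠ "INTERMISSION" := by
    intro m hm he
    apply h
    rw [List.getD_eq_getElem?_getD, List.getElem?_eq_getElem hm] at he
    exact he ▸ List.getElem_mem hm
  unfold pvFlush pvStotal
  refine foldl_eq_pvAdd_pvSum3 _ _ (pvContrib ov seg) ?_ st
  intro i hi st
  have hiL : i < seg.length := List.mem_range.mp hi
  dsimp only
  by_cases hsrc : seg.getD i "" = ""
  · rw [if_neg (by simpa using hsrc), pvContrib, if_neg (fun hc => hc.2 hsrc), pvAdd_zero_right]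
  · rw [if_pos (by simpa using hsrc)]
    simp only [List.foldl_cons, List.foldl_nil]
    rw [pvContrib, if_pos (show seg.getD i "" ≠ "INTERMISSION" ∧ seg.getD i "" ≠ "" from ⟨w i hiL, hsrc⟩)]
    by_cases k1 : i + 1 < seg.length
    · by_cases k2 : i + 2 < seg.length
      · by_cases k3 : i + 3 < seg.length
        · rw [if_pos k1, if_pos k2, if_pos k3, if_pos (show i + 1 < seg.length ∧ seg.getD (i + 1) "" ≠ "INTERMISSION" from ⟨k1, w _ k1⟩),
            if_pos (show i + 2 < seg.length ∧ seg.getD (i + 1) "" ≠ "INTERMISSION" ∧ seg.getD (i + 2) "" ≠ "INTERMISSION" from ⟨k2, w _ (by omega), w _ k2⟩),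
            if_pos (show i + 3 < seg.length ∧ seg.getD (i + 1) "" ≠ "INTERMISSION" ∧ seg.getD (i + 2) "" ≠ "INTERMISSION" ∧ seg.getD (i + 3) "" ≠ "INTERMISSION" from ⟨k3, w _ (by omega), w _ (by omega), w _ k3⟩)]
          simp [pvAddK, pvAdd]
        · rw [if_pos k1, if_pos k2, if_neg k3, if_pos (show i + 1 < seg.length ∧ seg.getD (i + 1) "" ≠ "INTERMISSION" from ⟨k1, w _ k1⟩),
            if_pos (show i + 2 < seg.length ∧ seg.getD (i + 1) "" ≠ "INTERMISSION" ∧ seg.getD (i + 2) "" ≠ "INTERMISSION" from ⟨k2, w _ (by omega), w _ k2⟩), if_neg (fun hc => k3 hc.1)]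
          simp [pvAddK, pvAdd]
      · have k3 : ¬ i + 3 < seg.length := by omega
        rw [if_pos k1, if_neg k2, if_neg k3, if_pos (show i + 1 < seg.length ∧ seg.getD (i + 1) "" ≠ "INTERMISSION" from ⟨k1, w _ k1⟩),
          if_neg (fun hc => k2 hc.1), if_neg (fun hc => k3 hc.1)]
        simp [pvAddK, pvAdd]
    · have k2 : ¬ i + 2 < seg.length := by omega
      have k3 : ¬ i + 3 < seg.length := by omega
      rw [if_neg k1, if_neg k2, if_neg k3, if_neg (fun hc => k1 hc.1),
        if_neg (fun hc => k2 hc.1), if_neg (fun hc => k3 hc.1)]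
      simp [pvAdd]

theorem getD_mid (seg rest : List String) :
    (seg ++ "INTERMISSION" :: rest).getD seg.length "" = "INTERMISSION" := by
  rw [List.getD_eq_getElem?_getD, List.getElem?_append_right (le_refl _)]
  simp

theorem contrib_shift (ov : List (String × List (String × List String))) (seg rest : List String) (j : Nat) :
    pvContrib ov (seg ++ "INTERMISSION" :: rest) (seg.length + 1 + j) = pvContrib ov rest j := by
  have g3 : ∀ m, (seg ++ "INTERMISSION" :: rest).getD (seg.length + 1 + m) "" = rest.getD m "" := by
    intro m
    rw [List.getD_eq_getElem?_getD, List.getD_eq_getElem?_getD,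
      List.getElem?_append_right (by omega : seg.length ≤ seg.length + 1 + m),
      show seg.length + 1 + m - seg.length = m + 1 from by omega, List.getElem?_cons_succ]
  have hlen : (seg ++ "INTERMISSION" :: rest).length = seg.length + 1 + rest.length := by
    simp only [List.length_append, List.length_cons]; omega
  simp only [pvContrib,
    show seg.length + 1 + j + 1 = seg.length + 1 + (j + 1) from by omega,
    show seg.length + 1 + j + 2 = seg.length + 1 + (j + 2) from by omega,
    show seg.length + 1 + j + 3 = seg.length + 1 + (j + 3) from by omega,
    g3, hlen, Nat.add_lt_add_iff_left]

theorem contrib_prefix (ov : List (String × List (String × List String))) (seg rest : List String)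
    (i : Nat) (hi : i < seg.length) :
    pvContrib ov (seg ++ "INTERMISSION" :: rest) i = pvContrib ov seg i := by
  have g1 : ∀ m, m < seg.length → (seg ++ "INTERMISSION" :: rest).getD m "" = seg.getD m "" := by
    intro m hm
    rw [List.getD_eq_getElem?_getD, List.getD_eq_getElem?_getD, List.getElem?_append_left hm]
  have hlen : (seg ++ "INTERMISSION" :: rest).length = seg.length + 1 + rest.length := by
    simp only [List.length_append, List.length_cons]; omega
  simp only [pvContrib, g1 i hi]
  by_cases h1 : i + 1 < seg.length
  · rw [g1 _ h1]
    by_cases h2 : i + 2 < seg.length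
    · rw [g1 _ h2]
      by_cases h3 : i + 3 < seg.length
      · rw [g1 _ h3]
        simp only [hlen]
        have l1 : i + 1 < seg.length + 1 + rest.length := by omega
        have l2 : i + 2 < seg.length + 1 + rest.length := by omega
        have l3 : i + 3 < seg.length + 1 + rest.length := by omega
        simp [l1, l2, l3, h1, h2, h3]
      · have e3 : i + 3 = seg.length := by omega
        rw [e3, getD_mid]
        simp only [hlen]
        have l1 : i + 1 < seg.length + 1 + rest.length := by omega
        have l2 : i + 2 < seg.length + 1 + rest.length := by omega
        simp [l1, l2, h1, h2]
    · have e2 : i + 2 = seg.length := by omega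
      rw [e2, getD_mid]
      simp only [hlen]
      have l1 : i + 1 < seg.length + 1 + rest.length := by omega
      simp [l1, h1, show ¬ (i + 3 < seg.length) from by omega]
  · have e1 : i + 1 = seg.length := by omega
    rw [e1, getD_mid]
    simp [show ¬ (i + 2 < seg.length) from by omega, show ¬ (i + 3 < seg.length) from by omega]

theorem Stotal_split (ov : List (String × List (String × List String))) (seg rest : List String) :
    pvStotal ov (seg ++ "INTERMISSION" :: rest) = pvAdd (pvStotal ov seg) (pvStotal ov rest) := by
  have hL : (seg ++ "INTERMISSION" :: rest).length = (seg.length + 1) + rest.length := by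
    simp only [List.length_append, List.length_cons]; omega
  have hmid : pvContrib ov (seg ++ "INTERMISSION" :: rest) seg.length = (0, 0, 0) := by
    rw [pvContrib, if_neg (fun hc => hc.1 (getD_mid seg rest))]
  unfold pvStotal
  rw [hL, List.range_add, List.range_succ, List.map_append, List.map_append, pvSum3_append,
    pvSum3_append, List.map_map,
    List.map_congr_left (fun i hi => contrib_prefix ov seg rest i (List.mem_range.mp hi))]
  simp only [Function.comp_def]
  rw [List.map_congr_left (fun j (_ : j ∈ List.range rest.length) => contrib_shift ov seg rest j)]
  simp [hmid, pvSum3, pvAdd_zero_right]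

theorem B_main (ov : List (String × List (String × List String))) :
    ∀ (rest seg : List String) (st : Int × Int × Int), "INTERMISSION" ∉ seg →
      (((rest ++ ["INTERMISSION"]).foldl
        (fun (p : (Int × Int × Int) × List String) piece =>
          if piece = "INTERMISSION" then (pvFlush ov p.2 p.1, [])
          else (p.1, p.2 ++ [piece]))
        (st, seg)).1) = pvAdd st (pvStotal ov (seg ++ rest)) := by
  intro rest
  induction rest with
  | nil =>
      intro seg st h
      simp only [List.nil_append, List.foldl_cons, List.foldl_nil, ↓reduceIte, List.append_nil]
      exact flush_eq ov seg h st
  | cons x rest ih =>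
      intro seg st h
      simp only [List.cons_append, List.foldl_cons]
      by_cases hx : x = "INTERMISSION"
      · subst hx
        simp only [↓reduceIte]
        rw [ih [] (pvFlush ov seg st) (by simp), flush_eq ov seg h st, List.nil_append,
          pvAdd_assoc, ← Stotal_split ov seg rest]
      · simp only [if_neg hx]
        rw [ih (seg ++ [x]) st (by
          intro hmem
          rcases List.mem_append.mp hmem with h1 | h2
          · exact h h1
          · exact hx (List.mem_singleton.mp h2).symm)]
        rw [List.append_assoc, List.singleton_append]

theorem B_eq (so : List String) (ov : List (String × List (String × List String))) :
    calculate_show_order_stats_alt so ov =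
      [("num_back_to_back", (pvStotal ov so).1), ("num_one_between", (pvStotal ov so).2.1), ("num_two_between", (pvStotal ov so).2.2)] := by
  simp only [calculate_show_order_stats_alt]
  rw [B_main ov so [] ((0, 0, 0)) (by simp), List.nil_append, pvAdd_zero_left]

-- ===== VERDICT (by name: the statement is the Claim_ definition above) =====
theorem calculate_show_order_stats_spec : Claim_equal_calculate_show_order_stats := by
  intro so ov _ _
  unfold Spec_calculate_show_order_stats
  rw [A_eq, B_eq]
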